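-- pv_equiv track=rewrite | github.com/ericmerle3789/Collatz-Junction-Theorem | research_log/R172_overdetermined_system.py | all_parity_vectors_aperiodic
-- ===== SOURCE A (Python) =====
-- from itertools import combinations
--
-- def all_parity_vectors_aperiodic(k, x):
--     """Vecteurs de parité apériodiques de longueur k avec x uns."""
--     for positions in combinations(range(k), x):
--         v = tuple(1 if i in positions else 0 for i in range(k))
--         is_aperiodic = True
--         for period in range(1, k):
--             if k % period == 0 and period < k:
--                 if v == v[:period] * (k // period):
--                     is_aperiodic = False
--                     break
--         if is_aperiodic:
--             yield v
-- ===== SOURCE B (Python) =====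
-- def all_parity_vectors_aperiodic(k, x):
--     """Vecteurs de parité apériodiques de longueur k avec x uns."""
--     # depth-first over prefixes with an explicit stack: extend by 1 first,
--     # so vectors come out in the same order as combinations of positions
--     stack = [(max(k, 0), x, ())]
--     while stack:
--         m, r, prefix = stack.pop()
--         if r < 0 or r > m:
--             continue
--         if m == 0:
--             v = prefix
--             if all(v != v[:p] * (k // p) for p in range(1, k) if k % p == 0):
--                 yield v
--             continue
--         stack.append((m - 1, r, prefix + (0,)))
--         stack.append((m - 1, r - 1, prefix + (1,)))
-- ===== Notes on version B (the rewrite author's own statement) =====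
-- stated objective: alternative
-- what changed: B generates the 0/1 vectors directly by recursion on the length (vectors starting with 1 first, preserving the combinations order) instead of enumerating position tuples with itertools.combinations and building each vector by an O(k) membership test per index, and folds the redundant 'period < k' test out of the aperiodicity filter.
import Mathlib
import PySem

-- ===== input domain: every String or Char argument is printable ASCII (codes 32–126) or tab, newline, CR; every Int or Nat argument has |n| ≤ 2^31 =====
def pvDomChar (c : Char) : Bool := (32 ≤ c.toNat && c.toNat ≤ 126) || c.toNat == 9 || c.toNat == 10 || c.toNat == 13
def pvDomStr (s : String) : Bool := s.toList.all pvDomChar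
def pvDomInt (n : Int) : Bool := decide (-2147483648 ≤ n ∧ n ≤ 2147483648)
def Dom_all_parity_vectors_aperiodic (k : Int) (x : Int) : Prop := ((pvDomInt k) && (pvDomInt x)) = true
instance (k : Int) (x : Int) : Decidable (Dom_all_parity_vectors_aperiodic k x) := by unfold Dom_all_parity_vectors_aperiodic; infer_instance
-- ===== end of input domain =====

-- B replaces A's combinations-of-positions + membership-indicator construction by a direct
-- recursive generation of the 0/1 vectors themselves (objective: alternative decomposition,
-- same yield order); both generators are materialised as lists.

-- ===== PORT A =====
-- tuple * n  (Python sequence repetition)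
def pvListMul (l : List Int) (n : Int) : List Int :=
  if n ≤ 0 then [] else (List.replicate n.toNat l).flatten

-- itertools.combinations(l, r): all r-element subsequences of l, lexicographic by position
-- (itertools returns immediately when r > len(pool); the guard mirrors that)
def pvCombinations : List Int → Nat → List (List Int)
  | _, 0 => [[]]
  | [], _ + 1 => []
  | a :: t, r + 1 =>
    if t.length < r then []
    else (pvCombinations t r).map (fun c => a :: c) ++ pvCombinations t (r + 1)

-- the inner 'for period in range(1, k)' loop with its early break (pure, so 'all' is exact)
def pvAperiodicA (k : Int) (v : List Int) : Bool :=
  (PySem.List.pyRange 1 k 1).all (fun p =>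
    !(PySem.Int.mod k p == 0 && decide (p < k) &&
      decide (v = pvListMul (PySem.List.slice v none (some p)) (PySem.Int.floordiv k p))))

def all_parity_vectors_aperiodic (k : Int) (x : Int) : List (List Int) :=
  if x < 0 then []  -- Python raises ValueError here (excluded by Pre_)
  else
    ((pvCombinations (PySem.List.pyRange 0 k 1) x.toNat).map
      (fun ps => (PySem.List.pyRange 0 k 1).map (fun i => if ps.contains i then (1 : Int) else 0))).filter
      (pvAperiodicA k)

-- ===== PORT B =====
-- all(v != v[:p] * (k // p) for p in range(1, k) if k % p == 0)
def pvAperiodicB (k : Int) (v : List Int) : Bool :=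
  (PySem.List.pyRange 1 k 1).all (fun p =>
    if PySem.Int.mod k p == 0 then
      decide (v ≠ pvListMul (PySem.List.slice v none (some p)) (PySem.Int.floordiv k p))
    else true)

-- the while-loop over the explicit stack of (remaining length, remaining ones, prefix)
def pvLoop (k : Int) : List (Nat × Int × List Int) → List (List Int)
  | [] => []
  | (m, r, pre) :: st =>
    if r < 0 ∨ (m : Int) < r then pvLoop k st
    else
      match m with
      | 0 => if pvAperiodicB k pre then pre :: pvLoop k st else pvLoop k st
      | n + 1 => pvLoop k ((n, r - 1, pre ++ [1]) :: (n, r, pre ++ [0]) :: st)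
termination_by st => (st.map (fun e => 3 ^ e.1)).sum
decreasing_by
  all_goals simp only [List.map_cons, List.sum_cons, pow_succ, pow_zero]
  all_goals try (have h : 0 < 3 ^ n := pow_pos (by norm_num) n)
  all_goals try (have h : 0 < 3 ^ m := pow_pos (by norm_num) m)
  all_goals omega

def all_parity_vectors_aperiodic_alt (k : Int) (x : Int) : List (List Int) :=
  pvLoop k [((max k 0).toNat, x, [])]

-- ===== PRECONDITION & SPEC =====
-- Pre_ excludes only x < 0, where Python's combinations(range(k), x) raises ValueError.
def Pre_all_parity_vectors_aperiodic (k : Int) (x : Int) : Prop := 0 ≤ x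
instance (k : Int) (x : Int) : Decidable (Pre_all_parity_vectors_aperiodic k x) := by
  unfold Pre_all_parity_vectors_aperiodic; infer_instance
def pvWitness_all_parity_vectors_aperiodic : Int × Int := (4, 2)

def Spec_all_parity_vectors_aperiodic (k : Int) (x : Int) (out : List (List Int)) : Prop :=
  out = all_parity_vectors_aperiodic_alt k x
instance (k : Int) (x : Int) (out : List (List Int)) : Decidable (Spec_all_parity_vectors_aperiodic k x out) := by
  unfold Spec_all_parity_vectors_aperiodic; infer_instance

-- ===== CLAIM (what is proved, stated in full; the proofs are below) =====
def Claim_equal_all_parity_vectors_aperiodic : Prop := ∀ (k : Int) (x : Int), Dom_all_parity_vectors_aperiodic k x → Pre_all_parity_vectors_aperiodic k x → Spec_all_parity_vectors_aperiodic k x (all_parity_vectors_aperiodic k x)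

-- ===== LEMMAS AND PROOFS =====

-- proof-side characterisation of the DFS: gen(m, r) as a recursive function
def pvGenB (m : Nat) (r : Int) : List (List Int) :=
  if r < 0 ∨ (m : Int) < r then []
  else
    match m with
    | 0 => [[]]
    | n + 1 => (pvGenB n (r - 1)).map (fun t => 1 :: t) ++
               (pvGenB n r).map (fun t => 0 :: t)

theorem pv_comb_zero {l : List Int} : pvCombinations l 0 = [[]] := by
  simp only [pvCombinations]

theorem pv_comb_big {l : List Int} {r : Nat} (h : l.length < r) :
    pvCombinations l r = [] := by
  match l, r with
  | _, 0 => simp at h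
  | [], _ + 1 => simp only [pvCombinations]
  | a :: t, r + 1 =>
    simp only [pvCombinations]
    rw [if_pos (by simp at h; omega)]

theorem pv_comb_cons {a : Int} {t : List Int} {r : Nat} (h : r + 1 ≤ t.length + 1) :
    pvCombinations (a :: t) (r + 1) =
      (pvCombinations t r).map (fun c => a :: c) ++ pvCombinations t (r + 1) := by
  simp only [pvCombinations]
  rw [if_neg (by omega)]

theorem pv_subset_of_mem_comb {l : List Int} {r : Nat} {c : List Int}
    (h : c ∈ pvCombinations l r) : c ⊆ l := by
  induction l generalizing r c with
  | nil =>
    cases r with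
    | zero => rw [pv_comb_zero] at h; simp at h; simp [h]
    | succ r => rw [pv_comb_big (by simp)] at h; simp at h
  | cons a t ih =>
    cases r with
    | zero => rw [pv_comb_zero] at h; simp at h; simp [h]
    | succ r =>
      by_cases hlen : (a :: t).length < r + 1
      · rw [pv_comb_big hlen] at h; simp at h
      · rw [pv_comb_cons (by simp at hlen; omega)] at h
        simp only [List.mem_append, List.mem_map] at h
        rcases h with ⟨c', hc', rfl⟩ | h
        · exact List.cons_subset_cons a (ih hc')
        · exact List.subset_cons_of_subset a (ih h)

theorem pvGenB_neg {m : Nat} {r : Int} (h : r < 0) : pvGenB m r = [] := by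
  unfold pvGenB; simp [h]

theorem pvGenB_big {m : Nat} {r : Int} (h : (m : Int) < r) : pvGenB m r = [] := by
  unfold pvGenB
  rw [if_pos (Or.inr h)]

theorem pvGenB_cons {n : Nat} {r : Int} (h0 : 0 ≤ r) (h1 : r ≤ (n : Int) + 1) :
    pvGenB (n + 1) r = (pvGenB n (r - 1)).map (fun t => 1 :: t) ++
                       (pvGenB n r).map (fun t => 0 :: t) := by
  rw [pvGenB]
  rw [if_neg (by push_cast; omega)]

theorem pvGenB_zero {r : Int} : pvGenB 0 r = if r = 0 then [[]] else [] := by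
  rw [pvGenB]
  by_cases h : r = 0
  · simp [h]
  · rw [if_pos (by omega), if_neg h]

theorem pv_all_congr {l : List Int} {f g : Int → Bool}
    (h : ∀ p ∈ l, f p = g p) : l.all f = l.all g := by
  induction l with
  | nil => rfl
  | cons a t ih =>
    simp only [List.all_cons, h a (List.mem_cons_self ..),
      ih (fun p hp => h p (List.mem_cons_of_mem a hp))]

theorem pv_aperiodic_eq (k : Int) (v : List Int) : pvAperiodicA k v = pvAperiodicB k v := by
  unfold pvAperiodicA pvAperiodicB
  apply pv_all_congr
  intro p hp
  rw [PySem.List.mem_pyRange_one] at hp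
  have hpk : decide (p < k) = true := by simp; omega
  rw [hpk]
  cases hm : (PySem.Int.mod k p == 0)
  · simp
  · simp

-- the heart: combinations-of-positions mapped to indicator vectors = direct recursive generation
theorem pv_main (l : List Int) : ∀ (r : Int), l.Nodup → 0 ≤ r →
    (pvCombinations l r.toNat).map
      (fun ps => l.map (fun i => if ps.contains i then (1 : Int) else 0)) =
    pvGenB l.length r := by
  induction l with
  | nil =>
    intro r hnd hr
    by_cases h : r = 0
    · subst h; simp [pv_comb_zero, pvGenB_zero]
    · rw [pv_comb_big (by simp; omega), List.map_nil, List.length_nil, pvGenB_zero]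
      simp [h]
  | cons a t ih =>
    intro r hnd hr
    have hat : a ∉ t := (List.nodup_cons.mp hnd).1
    have hndt : t.Nodup := (List.nodup_cons.mp hnd).2
    by_cases hbig : (t.length : Int) + 1 < r
    · rw [pv_comb_big (by simp; omega)]
      rw [List.map_nil]
      rw [List.length_cons]
      rw [pvGenB_big (by push_cast; omega)]
    · rw [List.length_cons]
      rw [pvGenB_cons hr (by omega)]
      by_cases h0 : r = 0
      · subst h0
        rw [pvGenB_neg (by norm_num)]
        rw [← ih 0 hndt le_rfl]
        simp [pv_comb_zero]
      · have hr1 : 0 ≤ r - 1 := by omega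
        have htn : r.toNat = (r - 1).toNat + 1 := by omega
        rw [htn]
        rw [pv_comb_cons (by simp at hbig ⊢; omega)]
        simp only [List.map_append, List.map_map]
        congr 1
        · rw [← ih (r-1) hndt hr1]
          rw [List.map_map]
          apply List.map_congr_left
          intro c _
          simp only [Function.comp_apply, List.map_cons, List.contains_cons,
            BEq.rfl, Bool.true_or, if_pos]
          congr 1
          apply List.map_congr_left
          intro i hi
          have : ¬ (i == a) = true := by
            simp only [beq_iff_eq]
            intro hia; exact hat (hia ▸ hi)
          simp [this]
        · have htn2 : (r - 1).toNat + 1 = r.toNat := by omega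
          rw [htn2, ← ih r hndt hr]
          rw [List.map_map]
          apply List.map_congr_left
          intro c hc
          have hac : a ∉ c := fun hm => hat (pv_subset_of_mem_comb hc hm)
          simp only [Function.comp_apply, List.map_cons]
          have hca : c.contains a = false := by
            simp only [List.contains_eq_mem, decide_eq_false_iff_not]; exact hac
          rw [hca]
          simp

-- the stack loop processes each pending frame into its generated-and-filtered vectors
theorem pvLoop_eq (k : Int) (st : List (Nat × Int × List Int)) :
    pvLoop k st =
    (st.map (fun e =>
      ((pvGenB e.1 e.2.1).map (fun t => e.2.2 ++ t)).filter (pvAperiodicB k))).flatten := by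
  fun_induction pvLoop k st with
  | case1 => simp
  | case2 m r pre st hg ih =>
    rw [ih]
    rcases hg with h | h
    · simp [pvGenB_neg h]
    · simp [pvGenB_big h]
  | case3 r pre st htest hg ih =>
    have hr : r = 0 := by simp at hg; omega
    subst hr
    rw [ih]
    simp [pvGenB_zero, htest]
  | case4 r pre st htest hg ih =>
    have hr : r = 0 := by simp at hg; omega
    subst hr
    rw [ih]
    simp [pvGenB_zero, htest]
  | case5 r pre st n hg ih =>
    rw [ih]
    have h1 : 0 ≤ r := by simp at hg; omega
    have h2 : r ≤ (n : Int) + 1 := by simp at hg; omega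
    simp [pvGenB_cons h1 h2, List.map_append, List.map_map, List.filter_append,
      List.append_assoc, Function.comp_def]

-- ===== VERDICT (by name: the statement is the Claim_ definition above) =====
theorem all_parity_vectors_aperiodic_spec : Claim_equal_all_parity_vectors_aperiodic := by
  intro k x _ hpre
  unfold Spec_all_parity_vectors_aperiodic
  unfold all_parity_vectors_aperiodic all_parity_vectors_aperiodic_alt
  rw [if_neg (by exact not_lt.mpr hpre)]
  have hlen : (PySem.List.pyRange 0 k 1).length = (max k 0).toNat := by
    rw [PySem.List.length_pyRange_one]
    omega
  rw [pv_main (PySem.List.pyRange 0 k 1) x (PySem.List.nodup_pyRange_one 0 k) hpre, hlen,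
    pvLoop_eq]
  simp only [List.map_cons, List.map_nil, List.flatten_cons, List.flatten_nil,
    List.nil_append, List.append_nil, List.map_id']
  apply List.filter_congr
  intro v _
  exact pv_aperiodic_eq k v
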